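-- pv_equiv track=rewrite | github.com/devansh-07/Quick-URL | app/main.py | base62enc
-- ===== SOURCE A (Python) =====
-- def base62enc(n, b=62):
--     vals = '0123456789abcdefghijklmnopqrstuvwxyzABCDEFGHIJKLMNOPQRSTUVWXYZ'
--     s = '0' if n == 0 else ''
--     while n >= 1:
--         r = n%b
--         n //= b
--         s = str(vals[r]) + s
--     return s
-- ===== SOURCE B (Python) =====
-- def base62enc(n, b=62):
--     vals = '0123456789abcdefghijklmnopqrstuvwxyzABCDEFGHIJKLMNOPQRSTUVWXYZ'
--     if n < 1:
--         return '0' if n == 0 else ''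
--     p = 1
--     while p * b <= n:
--         p *= b
--     out = []
--     while p >= 1:
--         out.append(vals[(n // p) % b])
--         p //= b
--     return ''.join(out)
-- ===== Notes on version B (the rewrite author's own statement) =====
-- stated objective: alternative
-- what changed: Replaces A's least-significant-digit-first loop that prepends characters to a string with a two-phase algorithm: first find the largest power p of b not exceeding n, then extract digits most-significant first via (n // p) % b into a list joined at the end.
-- intended difference: For n >= 1 with base b in [-62,-2], A returns a single character obtained through Python's negative-index wraparound on vals[n % b]; B returns '' because no digit encoding exists for a negative base, matching A's own '' convention for unencodable negative n. — e.g. on base62enc(5, -2): A returns "Z", B returns ""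
-- outside the precondition, e.g. on base62enc(5, -1): A returns '0', B does not finish within the time limit; on base62enc(100, -101): A returns 'Z', B returns ''; on base62enc(150, 100): A returns '1O', B returns '1O'
import Mathlib
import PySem

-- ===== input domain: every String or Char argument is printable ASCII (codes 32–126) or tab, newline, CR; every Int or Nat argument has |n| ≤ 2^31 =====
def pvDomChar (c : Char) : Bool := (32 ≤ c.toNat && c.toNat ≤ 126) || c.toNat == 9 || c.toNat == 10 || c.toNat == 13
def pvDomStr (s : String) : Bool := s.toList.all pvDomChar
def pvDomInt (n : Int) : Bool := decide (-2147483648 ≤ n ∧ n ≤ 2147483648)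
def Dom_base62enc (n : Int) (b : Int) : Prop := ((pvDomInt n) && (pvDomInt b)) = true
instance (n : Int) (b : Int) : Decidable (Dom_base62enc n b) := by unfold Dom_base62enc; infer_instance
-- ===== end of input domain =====

-- B replaces A's least-significant-digit-first string-prepend loop by a two-phase algorithm
-- (largest power of b ≤ n, then most-significant-digit extraction (n // p) % b into a joined list);
-- on negative bases -62..-2 A's wraparound single character is intentionally replaced by "" (see D_ below).

-- ===== PORT A =====
def pvA_vals : String := "0123456789abcdefghijklmnopqrstuvwxyzABCDEFGHIJKLMNOPQRSTUVWXYZ"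
-- str(vals[r]): Python raises IndexError when r is out of range; that case is excluded by Pre_,
-- here it yields "" (unreachable inside Pre_); in range this is exact.
def pvA_chr (o : Option Char) : String :=
  match o with
  | some c => String.singleton c
  | none => ""
-- the while-loop of A, transliterated with fuel (n.toNat + 1 steps suffice on Pre_: n strictly
-- shrinks each iteration once b ≥ 2; Python diverges for b = 1, which Pre_ excludes)
def pvA_loop (b : Int) : Nat → Int → String → String
  | 0, _, s => s
  | fuel+1, n, s =>
    if 1 ≤ n then
      pvA_loop b fuel (PySem.Int.floordiv n b)
        (pvA_chr (PySem.Str.pyGet? pvA_vals (PySem.Int.mod n b)) ++ s)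
    else s
def base62enc (n : Int) (b : Int) : String :=
  pvA_loop b (n.toNat + 1) n (if n = 0 then "0" else "")

-- ===== PORT B =====
def pvB_vals : String := "0123456789abcdefghijklmnopqrstuvwxyzABCDEFGHIJKLMNOPQRSTUVWXYZ"
-- vals[i] (a one-character string); IndexError (out of range) is excluded by Pre_, "" unreachable inside Pre_
def pvB_chr (o : Option Char) : String :=
  o.elim "" String.singleton
-- Source B phase 1: 'p = 1; while p * b <= n: p *= b' (fuel; n.toNat + 1 steps suffice on Pre_,
-- |p| at least doubles per step; Python diverges for b ∈ {0, 1, -1}, which Pre_ excludes)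
def pvB_pow (n b : Int) : Nat → Int → Int
  | 0, p => p
  | fuel+1, p => if p * b ≤ n then pvB_pow n b fuel (p * b) else p
-- Source B phase 2: 'while p >= 1: out.append(vals[(n // p) % b]); p //= b'
def pvB_digits (n b : Int) : Nat → Int → List String
  | 0, _ => []
  | fuel+1, p =>
    if 1 ≤ p then
      pvB_chr (PySem.Str.pyGet? pvB_vals (PySem.Int.mod (PySem.Int.floordiv n p) b)) ::
        pvB_digits n b fuel (PySem.Int.floordiv p b)
    else []
def base62enc_alt (n : Int) (b : Int) : String :=
  if n < 1 then (if n = 0 then "0" else "")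
  else PySem.Str.join "" (pvB_digits n b (n.toNat + 1) (pvB_pow n b (n.toNat + 1) 1))

-- ===== PRECONDITION & SPEC =====
-- Pre_ excludes positive-n inputs on which at least one of the two programs does not return a value:
-- b = 0 (A: ZeroDivisionError; B diverges), b = 1 (both diverge), b = -1 (A returns via index
-- wraparound but B's power loop diverges), b ≤ -63 (A: IndexError whenever the remainder falls
-- below -62, a digit-dependent region with no closed form; A does return on the few inputs whose
-- remainder stays ≥ -62), and b > 62 with n ≥ 62 (A and B: IndexError whenever some base-b digit
-- reaches 62, likewise digit-dependent).
def Pre_base62enc (n : Int) (b : Int) : Prop :=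
  n ≤ 0 ∨ (2 ≤ b ∧ b ≤ 62) ∨ (-62 ≤ b ∧ b ≤ -2) ∨ (62 < b ∧ n < 62)
instance (n : Int) (b : Int) : Decidable (Pre_base62enc n b) := by unfold Pre_base62enc; infer_instance
def pvWitness_base62enc : Int × Int := (123, 62)
-- For n ≥ 1 with base b in [-62, -2], A returns a single character obtained through Python's
-- negative-index wraparound on vals[n % b]; B returns "" because no digit encoding exists for a
-- negative base, matching A's own "" convention for unencodable negative n.
def D_base62enc (n : Int) (b : Int) : Prop := 1 ≤ n ∧ -62 ≤ b ∧ b ≤ -2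
instance (n : Int) (b : Int) : Decidable (D_base62enc n b) := by unfold D_base62enc; infer_instance
def Spec_base62enc (n : Int) (b : Int) (out : String) : Prop :=
  ¬ D_base62enc n b → out = base62enc_alt n b
instance (n : Int) (b : Int) (out : String) : Decidable (Spec_base62enc n b out) := by
  unfold Spec_base62enc; infer_instance
def pvDiffWitness_base62enc : Int × Int := (5, -2)
def pvDiffWitnessOut_base62enc : String × String := ("Z", "")

-- ===== CLAIM (what is proved, stated in full; the proofs are below) =====
def Claim_unchanged_base62enc : Prop := ∀ (n : Int) (b : Int), Dom_base62enc n b → Pre_base62enc n b → Spec_base62enc n b (base62enc n b)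
def Claim_changed_base62enc : Prop := Dom_base62enc (pvDiffWitness_base62enc.1) (pvDiffWitness_base62enc.2) ∧ Pre_base62enc (pvDiffWitness_base62enc.1) (pvDiffWitness_base62enc.2) ∧ D_base62enc (pvDiffWitness_base62enc.1) (pvDiffWitness_base62enc.2) ∧ base62enc (pvDiffWitness_base62enc.1) (pvDiffWitness_base62enc.2) = pvDiffWitnessOut_base62enc.1 ∧ base62enc_alt (pvDiffWitness_base62enc.1) (pvDiffWitness_base62enc.2) = pvDiffWitnessOut_base62enc.2 ∧ pvDiffWitnessOut_base62enc.1 ≠ pvDiffWitnessOut_base62enc.2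
def Claim_exact_base62enc : Prop := ∀ (n : Int) (b : Int), Dom_base62enc n b → Pre_base62enc n b → D_base62enc n b → base62enc n b ≠ base62enc_alt n b

-- ===== LEMMAS AND PROOFS =====

-- ''.join distributes over cons and over a trailing singleton
theorem pv_join_nil : PySem.Str.join "" [] = "" := rfl

theorem pv_join_cons (p : String) (rest : List String) :
    PySem.Str.join "" (p :: rest) = p ++ PySem.Str.join "" rest := by
  apply String.toList_inj.mp
  rw [String.toList_append]
  simp only [PySem.Str.join, String.toList_ofList, List.map_cons]
  cases rest with
  | nil => simp [PySem.Chars.join_singleton, PySem.Chars.join_nil]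
  | cons q r => simp [PySem.Chars.join_cons_cons]

theorem pv_join_append_singleton (l : List String) (x : String) :
    PySem.Str.join "" (l ++ [x]) = PySem.Str.join "" l ++ x := by
  induction l with
  | nil =>
    rw [List.nil_append, pv_join_cons, pv_join_nil, String.append_empty, String.empty_append]
  | cons p r ih =>
    rw [List.cons_append, pv_join_cons, pv_join_cons, ih, String.append_assoc]

theorem pv_chr_eq (o : Option Char) : pvA_chr o = pvB_chr o := by
  cases o <;> rfl

theorem pvA_loop_step (b : Int) (f : Nat) (n : Int) (s : String) (h : 1 ≤ n) :
    pvA_loop b (f + 1) n s =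
      pvA_loop b f (PySem.Int.floordiv n b)
        (pvA_chr (PySem.Str.pyGet? pvA_vals (PySem.Int.mod n b)) ++ s) := by
  simp [pvA_loop, h]

theorem pvA_loop_nonpos (b : Int) (f : Nat) (n : Int) (s : String) (h : n < 1) :
    pvA_loop b f n s = s := by
  cases f with
  | zero => rfl
  | succ f => simp [pvA_loop, show ¬ (1 ≤ n) by omega]

theorem pvB_digits_step (n b : Int) (f : Nat) (p : Int) (h : 1 ≤ p) :
    pvB_digits n b (f + 1) p =
      pvB_chr (PySem.Str.pyGet? pvB_vals (PySem.Int.mod (PySem.Int.floordiv n p) b)) ::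
        pvB_digits n b f (PySem.Int.floordiv p b) := by
  simp [pvB_digits, h]

theorem pvB_digits_nonpos (n b : Int) (f : Nat) (p : Int) (h : p < 1) :
    pvB_digits n b f p = [] := by
  cases f with
  | zero => rfl
  | succ f => simp [pvB_digits, show ¬ (1 ≤ p) by omega]

-- phase 1 for b ≥ 2: with enough fuel it returns the largest power p·b^k of b (times the start
-- value p) that does not exceed n
theorem pvB_pow_spec (n b : Int) (hb : 2 ≤ b) :
    ∀ (f : Nat) (p : Int), 1 ≤ p → p ≤ n → n < p * 2 ^ f →
      ∃ k : Nat, pvB_pow n b f p = p * b ^ k ∧ p * b ^ k ≤ n ∧ n < p * b ^ (k + 1) := by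
  intro f
  induction f with
  | zero => intro p h1 h2 h3; simp at h3; omega
  | succ f ih =>
    intro p h1 h2 h3
    by_cases hc : p * b ≤ n
    · obtain ⟨k, hk, hk1, hk2⟩ := ih (p * b) (by nlinarith) hc (by
        have h2f : (0:Int) < 2 ^ f := by positivity
        have key : p * 2 * 2 ^ f ≤ p * b * 2 ^ f := by
          apply mul_le_mul_of_nonneg_right _ (le_of_lt h2f)
          nlinarith
        calc (n:Int) < p * 2 ^ (f+1) := h3
        _ = p * 2 * 2 ^ f := by ring
        _ ≤ p * b * 2 ^ f := key)
      refine ⟨k + 1, ?_, ?_, ?_⟩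
      · show (if p * b ≤ n then pvB_pow n b f (p * b) else p) = p * b ^ (k + 1)
        rw [if_pos hc, hk]; ring
      · have e : p * b ^ (k + 1) = p * b * b ^ k := by ring
        linarith
      · have e : p * b ^ (k + 1 + 1) = p * b * b ^ (k + 1) := by ring
        linarith
    · exact ⟨0, by simp [pvB_pow, hc], by simpa using h2, by simpa using not_le.mp hc⟩

theorem pv_fd_one (n : Int) : PySem.Int.floordiv n 1 = n := by
  rw [PySem.Int.floordiv_eq_ediv_of_pos (by omega)]; simp

theorem pv_fd_comp (n b c : Int) (hb : 0 < b) (hc : 0 < c) :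
    PySem.Int.floordiv (PySem.Int.floordiv n b) c = PySem.Int.floordiv n (b * c) := by
  rw [PySem.Int.floordiv_eq_ediv_of_pos hb, PySem.Int.floordiv_eq_ediv_of_pos hc,
    PySem.Int.floordiv_eq_ediv_of_pos (by positivity)]
  exact Int.ediv_ediv_of_nonneg (by omega)

theorem pv_fd_pow_succ (b : Int) (hb : 2 ≤ b) (k : Nat) :
    PySem.Int.floordiv (b ^ (k + 1)) b = b ^ k := by
  rw [PySem.Int.floordiv_eq_ediv_of_pos (by omega), pow_succ]
  exact Int.mul_ediv_cancel _ (by omega)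

-- shifting the digit loop: digits of n starting at b^(k+1) = digits of n//b starting at b^k,
-- followed by the last digit vals[n % b]
theorem pvB_digits_shift (b : Int) (hb : 2 ≤ b) :
    ∀ (k : Nat) (f : Nat), k < f → ∀ (n : Int),
      pvB_digits n b (f + 1) (b ^ (k + 1)) =
        pvB_digits (PySem.Int.floordiv n b) b f (b ^ k) ++
          [pvB_chr (PySem.Str.pyGet? pvB_vals (PySem.Int.mod n b))] := by
  intro k
  induction k with
  | zero =>
    intro f hf n
    obtain ⟨g, rfl⟩ : ∃ g, f = g + 1 := ⟨f - 1, by omega⟩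
    have h1b : (1:Int) ≤ b ^ (0 + 1) := one_le_pow₀ (by omega)
    have hfd1 : PySem.Int.floordiv (1:Int) b = 0 := by
      rw [PySem.Int.floordiv_eq_ediv_of_pos (by omega)]
      exact Int.ediv_eq_zero_of_lt (by omega) (by omega)
    rw [pvB_digits_step _ _ _ _ h1b, pv_fd_pow_succ b hb 0,
      pvB_digits_step _ _ _ _ (by rw [pow_zero]),
      pvB_digits_step _ _ _ _ (by rw [pow_zero])]
    simp only [pow_zero, pv_fd_one, hfd1, zero_add, pow_one]
    rw [pvB_digits_nonpos _ _ _ _ (by omega), pvB_digits_nonpos _ _ _ _ (by omega)]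
    rfl
  | succ k ih =>
    intro f hf n
    obtain ⟨g, rfl⟩ : ∃ g, f = g + 1 := ⟨f - 1, by omega⟩
    have hp1 : (1:Int) ≤ b ^ (k + 1 + 1) := one_le_pow₀ (by omega)
    have hp2 : (1:Int) ≤ b ^ (k + 1) := one_le_pow₀ (by omega)
    have hhead : PySem.Int.floordiv n (b ^ (k + 1 + 1)) =
        PySem.Int.floordiv (PySem.Int.floordiv n b) (b ^ (k + 1)) := by
      rw [pv_fd_comp n b (b ^ (k+1)) (by omega) (by positivity), pow_succ']
    rw [pvB_digits_step _ _ _ _ hp1, pv_fd_pow_succ b hb (k+1), hhead,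
      ih g (by omega) n, pvB_digits_step _ _ _ _ hp2, pv_fd_pow_succ b hb k]
    rfl

-- main loop correspondence for b ≥ 2: A's prepend loop equals the join of B's digit list,
-- whenever p = b^k brackets n
theorem pv_main (b : Int) (hb : 2 ≤ b) :
    ∀ (k : Nat) (n : Int) (fa fb : Nat) (s : String), k < fb → n < (fa : Int) →
      b ^ k ≤ n → n < b ^ (k + 1) →
      pvA_loop b fa n s = PySem.Str.join "" (pvB_digits n b fb (b ^ k)) ++ s := by
  intro k
  induction k with
  | zero =>
    intro n fa fb s hfb hfa hlo hhi
    simp only [pow_zero] at hlo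
    simp only [zero_add, pow_one] at hhi
    obtain ⟨a, rfl⟩ : ∃ a, fa = a + 1 := ⟨fa - 1, by omega⟩
    obtain ⟨g, rfl⟩ : ∃ g, fb = g + 1 := ⟨fb - 1, by omega⟩
    have hfd : PySem.Int.floordiv n b = 0 := by
      rw [PySem.Int.floordiv_eq_ediv_of_pos (by omega)]
      exact Int.ediv_eq_zero_of_lt (by omega) hhi
    have hfdb : PySem.Int.floordiv (1:Int) b = 0 := by
      rw [PySem.Int.floordiv_eq_ediv_of_pos (by omega)]
      exact Int.ediv_eq_zero_of_lt (by omega) (by omega)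
    simp only [pvA_loop, if_pos hlo, hfd, pvA_loop_nonpos b a 0 _ (by omega),
      pvB_digits, pow_zero, if_pos (le_refl (1:Int)), pv_fd_one, hfdb]
    rw [pvB_digits_nonpos _ _ _ _ (by omega), pv_join_cons, pv_join_nil,
      String.append_empty, pv_chr_eq]
    rfl
  | succ k ih =>
    intro n fa fb s hfb hfa hlo hhi
    have h1n : (1:Int) ≤ n := le_trans (one_le_pow₀ (by omega)) hlo
    obtain ⟨a, rfl⟩ : ∃ a, fa = a + 1 := ⟨fa - 1, by omega⟩
    obtain ⟨g, rfl⟩ : ∃ g, fb = g + 1 := ⟨fb - 1, by omega⟩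
    -- bounds on n // b
    have hlo' : b ^ k ≤ PySem.Int.floordiv n b := by
      rw [PySem.Int.le_floordiv_iff_mul_le (by omega)]
      calc b ^ k * b = b ^ (k + 1) := (pow_succ b k).symm
      _ ≤ n := hlo
    have hhi' : PySem.Int.floordiv n b < b ^ (k + 1) := by
      rw [PySem.Int.floordiv_lt_iff_lt_mul (by omega)]
      calc n < b ^ (k + 1 + 1) := hhi
      _ = b ^ (k + 1) * b := pow_succ b (k+1)
    have hfd_lt : PySem.Int.floordiv n b < n := by
      rw [PySem.Int.floordiv_lt_iff_lt_mul (by omega)]; nlinarith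
    simp only [pvA_loop, if_pos h1n]
    rw [ih (PySem.Int.floordiv n b) a g _ (by omega) (by omega) hlo' hhi']
    rw [pvB_digits_shift b hb k g (by omega) n, pv_join_append_singleton,
      String.append_assoc, pv_chr_eq]
    rfl

-- fuel sufficiency: n < 2 ^ (n.toNat + 1) for 0 ≤ n
theorem pv_fuel (n : Int) (h : 0 ≤ n) : n < 2 ^ (n.toNat + 1) := by
  have h1 : n.toNat < 2 ^ n.toNat := Nat.lt_two_pow_self
  have h2 : (n.toNat : Int) < (2:Int) ^ n.toNat := by exact_mod_cast h1
  have h3 : ((2:Int)) ^ n.toNat ≤ 2 ^ (n.toNat + 1) := by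
    have : (0:Int) < 2 ^ n.toNat := by positivity
    rw [pow_succ]; omega
  omega

-- exponent bound: if b^k ≤ n (b ≥ 2) then (k : Int) < n
theorem pv_exp_lt (b n : Int) (hb : 2 ≤ b) (k : Nat) (h : b ^ k ≤ n) : (k : Int) < n := by
  have h1 : (k:Nat) < 2 ^ k := Nat.lt_two_pow_self
  have h2 : ((k:Nat) : Int) < (2:Int) ^ k := by exact_mod_cast h1
  have h3 : (2:Int) ^ k ≤ b ^ k := pow_le_pow_left₀ (by omega) hb k
  omega

-- phase 1 for b ≤ -2: with enough fuel the loop always stops at a NEGATIVE p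
-- (|p| at least doubles each step, and the loop exits only when p·b > n > 0, forcing p < 0)
theorem pvB_pow_neg (n b : Int) (hb : b ≤ -2) (hn : 1 ≤ n) :
    ∀ (f : Nat) (p : Int), 1 ≤ p → p ≤ n → n < p * 2 ^ f → pvB_pow n b f p ≤ -1 := by
  intro f
  induction f using Nat.strong_induction_on with
  | _ f ih =>
    intro p h1 h2 h3
    cases f with
    | zero => simp at h3; omega
    | succ f' =>
      have hstep : p * b ≤ n := by nlinarith
      have hpb : p * b ≤ 1 * b := mul_le_mul_of_nonpos_right h1 (by omega)
      cases f' with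
      | zero =>
        simp only [pvB_pow, if_pos hstep]
        linarith
      | succ g =>
        have hbb : (4:Int) ≤ b * b := by nlinarith [sq_nonneg (b + 2)]
        have h4p : 4 * p ≤ p * b * b := by nlinarith
        simp only [pvB_pow, if_pos hstep]
        by_cases hc : p * b * b ≤ n
        · simp only [if_pos hc]
          apply ih g (by omega) (p * b * b) (by linarith) hc
          have h2g : (0:Int) < 2 ^ g := by positivity
          have e : p * 2 ^ (g + 1 + 1) = 4 * p * 2 ^ g := by ring
          have h5 : 4 * p * 2 ^ g ≤ p * b * b * 2 ^ g :=
            mul_le_mul_of_nonneg_right h4p (le_of_lt h2g)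
          linarith
        · simp only [if_neg hc]
          linarith

-- one A-iteration then stop, for negative bases (n // b ≤ -1)
theorem pv_floordiv_neg_le (n b : Int) (h1 : 1 ≤ n) (hb : b ≤ -1) :
    PySem.Int.floordiv n b ≤ -1 := by
  have hmod : PySem.Int.mod n b ≤ 0 := (PySem.Int.mod_neg_bounds n (by omega)).2
  have hkey := PySem.Int.floordiv_mul_add_mod n b
  by_contra hq
  have hq0 : 0 ≤ PySem.Int.floordiv n b := by omega
  nlinarith

-- on D_ the wraparound index n % b lies in [-61, 0], so A's character lookup succeeds
theorem pv_chr_on_D (n b : Int) (hb1 : -62 ≤ b) (hb2 : b ≤ -2) :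
    ∃ c : Char, PySem.Str.pyGet? pvA_vals (PySem.Int.mod n b) = some c := by
  have hm := PySem.Int.mod_neg_bounds n (show b < 0 by omega)
  have hlen : pvA_vals.toList.length = 62 := by decide
  have hne : PySem.Str.pyGet? pvA_vals (PySem.Int.mod n b) ≠ none := by
    show PySem.Chars.pyGet? pvA_vals.toList (PySem.Int.mod n b) ≠ none
    show PySem.List.pyGet? pvA_vals.toList (PySem.Int.mod n b) ≠ none
    rw [Ne, PySem.List.pyGet?_eq_none_iff, hlen]
    intro hcon
    exact hcon ⟨by omega, by omega⟩
  exact Option.ne_none_iff_exists'.mp hne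

-- A's value on D_: the single wraparound character; B's value on D_: ""
theorem pvA_on_D (n b : Int) (h1 : 1 ≤ n) (hb : b ≤ -1) :
    base62enc n b = pvA_chr (PySem.Str.pyGet? pvA_vals (PySem.Int.mod n b)) ++ "" := by
  unfold base62enc
  obtain ⟨a, ha⟩ : ∃ a, n.toNat + 1 = a + 2 := ⟨n.toNat - 1, by omega⟩
  rw [ha, if_neg (show ¬ n = 0 by omega), pvA_loop_step b (a + 1) n _ h1]
  apply pvA_loop_nonpos
  have := pv_floordiv_neg_le n b h1 hb
  omega

theorem pvB_on_D (n b : Int) (h1 : 1 ≤ n) (hb : b ≤ -2) :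
    base62enc_alt n b = "" := by
  unfold base62enc_alt
  rw [if_neg (show ¬ n < 1 by omega)]
  have hp : pvB_pow n b (n.toNat + 1) 1 ≤ -1 :=
    pvB_pow_neg n b hb h1 (n.toNat + 1) 1 le_rfl h1 (by simpa using pv_fuel n (by omega))
  rw [pvB_digits_nonpos n b (n.toNat + 1) _ (by omega), pv_join_nil]

-- ===== VERDICT (by name: the statements are the Claim_ definitions above) =====
theorem base62enc_spec : Claim_unchanged_base62enc := by
  intro n b _hdom hpre hnd
  unfold base62enc base62enc_alt
  by_cases h0 : n < 1
  · rw [pvA_loop_nonpos b _ n _ h0]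
    simp [h0]
  · have h1 : 1 ≤ n := by omega
    have hb2 : 2 ≤ b := by
      rcases hpre with h | h | h | h
      · omega
      · omega
      · exact absurd ⟨h1, h.1, h.2⟩ hnd
      · omega
    obtain ⟨k, hk, hk1, hk2⟩ := pvB_pow_spec n b hb2 (n.toNat + 1) 1 le_rfl h1
      (by simpa using pv_fuel n (by omega))
    rw [one_mul] at hk hk1 hk2
    have hkfb : k < n.toNat + 1 := by
      have := pv_exp_lt b n hb2 k hk1
      omega
    rw [if_neg (show ¬ n < 1 by omega), hk, if_neg (show ¬ n = 0 by omega)]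
    rw [pv_main b hb2 k n (n.toNat + 1) (n.toNat + 1) "" hkfb (by omega) hk1 hk2]
    exact String.append_empty

theorem base62enc_changed : Claim_changed_base62enc := by
  unfold Claim_changed_base62enc
  refine ⟨by decide, by decide, by decide, ?_, ?_, by decide⟩
  · decide
  · decide

theorem base62enc_tight : Claim_exact_base62enc := by
  intro n b _hdom _hpre hd
  obtain ⟨h1, hb1, hb2⟩ := hd
  rw [pvA_on_D n b h1 (by omega), pvB_on_D n b h1 hb2]
  obtain ⟨c, hc⟩ := pv_chr_on_D n b hb1 hb2
  rw [hc]
  intro hcon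
  have := congrArg String.toList hcon
  simp [pvA_chr, String.toList_singleton] at this
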